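-- pv_equiv track=rewrite | github.com/uzhdag/pathpy | pathpy/paths.py | contained_paths
-- ===== SOURCE A (Python) =====
-- def contained_paths(p, node_filter):
--     """Returns the set of maximum-length sub-paths of the path p, which only contain
--     nodes that appear in the node_filter. As an example, for the path (a,b,c,d,e,f,g)
--     and a node_filter [a,b,d,f,g], the method will return [(a,b), (d,), (f,g)].
--
--     Parameters
--     ----------
--     p: tuple
--         a path tuple to check for contained paths
--     node_filter: set
--         a set of nodes to which the contained paths should be limited
--
--     Returns
--     -------
--     """
--
--     contained_paths = []
--     current_path = ()
--     for k in range(0, len(p)):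
--         if p[k] in node_filter:
--             current_path += (p[k],)
--         else:
--             if current_path:
--                 contained_paths.append(current_path)
--                 current_path = ()
--     if current_path:
--         contained_paths.append(current_path)
--
--     return contained_paths
-- ===== SOURCE B (Python) =====
-- def contained_paths(p, node_filter):
--     res = []
--     i, n = 0, len(p)
--     while i < n:
--         if p[i] in node_filter:
--             j = i + 1
--             while j < n and p[j] in node_filter:
--                 j += 1
--             res.append(tuple(p[i:j]))
--             i = j
--         else:
--             i += 1
--     return res
-- ===== Notes on version B (the rewrite author's own statement) =====
-- stated objective: alternative
-- what changed: Replaced the accumulator-with-flush loop by a span scan: find the start of each maximal run of filter members, emit the whole run as one slice, and jump past it; no current_path state or post-loop flush remains.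
import Mathlib
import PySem

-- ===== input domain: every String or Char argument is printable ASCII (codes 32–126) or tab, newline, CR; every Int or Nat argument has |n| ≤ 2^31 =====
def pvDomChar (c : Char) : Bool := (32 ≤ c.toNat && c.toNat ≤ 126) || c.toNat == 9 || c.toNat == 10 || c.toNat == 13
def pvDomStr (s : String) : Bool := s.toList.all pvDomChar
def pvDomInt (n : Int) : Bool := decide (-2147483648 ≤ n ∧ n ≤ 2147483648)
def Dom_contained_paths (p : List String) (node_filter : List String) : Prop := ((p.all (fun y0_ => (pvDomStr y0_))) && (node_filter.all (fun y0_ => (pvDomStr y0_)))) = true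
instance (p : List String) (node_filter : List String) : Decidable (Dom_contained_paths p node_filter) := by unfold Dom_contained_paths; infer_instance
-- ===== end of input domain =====

-- B replaces A's accumulator-with-flush loop by a span scan that emits each maximal run as a slice; alternative decomposition, same cost.


-- ===== PORT A =====
-- loop body of A: extend current_path or flush it into contained_paths
def cpStepA (nf : List String) (st : List (List String) × List String) (x : String) :
    List (List String) × List String :=
  if x ∈ nf then (st.1, st.2 ++ [x])
  else if st.2 ≠ [] then (st.1 ++ [st.2], []) else st

def contained_paths (p : List String) (node_filter : List String) : List (List String) :=
  let st := (PySem.List.pyRange 0 (PySem.List.len p) 1).foldl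
      (fun st k => cpStepA node_filter st (PySem.List.pyGetD p k "")) ([], [])
  if st.2 ≠ [] then st.1 ++ [st.2] else st.1

-- ===== PORT B =====
-- span scan: at a member, take the whole maximal run and continue past it
def cpSpan (nf : List String) : List String → List (List String)
  | [] => []
  | x :: xs =>
    if x ∈ nf then
      (x :: xs.takeWhile (fun y => decide (y ∈ nf))) ::
        cpSpan nf (xs.dropWhile (fun y => decide (y ∈ nf)))
    else cpSpan nf xs
termination_by l => l.length
decreasing_by
  · exact Nat.lt_succ_of_le ((List.dropWhile_sublist _).length_le)
  · simp

def contained_paths_alt (p : List String) (node_filter : List String) : List (List String) :=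
  cpSpan node_filter p

-- ===== PRECONDITION & SPEC =====
def Spec_contained_paths (p : List String) (node_filter : List String) (out : List (List String)) : Prop := out = contained_paths_alt p node_filter
instance (p : List String) (node_filter : List String) (out : List (List String)) : Decidable (Spec_contained_paths p node_filter out) := by unfold Spec_contained_paths; infer_instance

-- ===== CLAIM (what is proved, stated in full; the proofs are below) =====
def Claim_equal_contained_paths : Prop := ∀ (p : List String) (node_filter : List String), Dom_contained_paths p node_filter → Spec_contained_paths p node_filter (contained_paths p node_filter)

-- ===== LEMMAS AND PROOFS =====

-- A as a structural recursion carrying the current run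
def cpRecA (nf : List String) : List String → List String → List (List String)
  | cur, [] => if cur ≠ [] then [cur] else []
  | cur, x :: xs =>
    if x ∈ nf then cpRecA nf (cur ++ [x]) xs
    else (if cur ≠ [] then [cur] else []) ++ cpRecA nf [] xs

lemma cpSpan_cons (nf : List String) (x : String) (xs : List String) :
    cpSpan nf (x :: xs) =
      if x ∈ nf then
        (x :: xs.takeWhile (fun y => decide (y ∈ nf))) ::
          cpSpan nf (xs.dropWhile (fun y => decide (y ∈ nf)))
      else cpSpan nf xs := by
  rw [cpSpan]

lemma cpFold_eq (nf : List String) (p : List String) :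
    ∀ (acc : List (List String)) (cur : List String),
      (let st := p.foldl (cpStepA nf) (acc, cur);
       if st.2 ≠ [] then st.1 ++ [st.2] else st.1) = acc ++ cpRecA nf cur p := by
  induction p with
  | nil =>
    intro acc cur
    simp only [List.foldl_nil, cpRecA]
    by_cases h : cur = [] <;> simp [h]
  | cons x xs ih =>
    intro acc cur
    simp only [List.foldl_cons]
    by_cases hx : x ∈ nf
    · have hstep : cpStepA nf (acc, cur) x = (acc, cur ++ [x]) := by simp [cpStepA, hx]
      rw [hstep, ih acc (cur ++ [x]), cpRecA, if_pos hx]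
    · by_cases hc : cur = []
      · have hstep : cpStepA nf (acc, cur) x = (acc, cur) := by simp [cpStepA, hx, hc]
        rw [hstep, ih acc cur, cpRecA, if_neg hx]
        simp [hc]
      · have hstep : cpStepA nf (acc, cur) x = (acc ++ [cur], []) := by
          simp [cpStepA, hx, hc]
        rw [hstep, ih (acc ++ [cur]) [], cpRecA, if_neg hx]
        simp [hc]

lemma cpRecA_eq_span (nf : List String) (p : List String) :
    (∀ cur : List String, cur ≠ [] →
      cpRecA nf cur p =
        (cur ++ p.takeWhile (fun y => decide (y ∈ nf))) ::
          cpSpan nf (p.dropWhile (fun y => decide (y ∈ nf)))) ∧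
    cpRecA nf [] p = cpSpan nf p := by
  induction p with
  | nil =>
    refine ⟨fun cur hc => ?_, ?_⟩ <;> simp [cpRecA, cpSpan, *]
  | cons x xs ih =>
    by_cases hx : x ∈ nf
    · refine ⟨fun cur hc => ?_, ?_⟩
      · rw [cpRecA, if_pos hx, ih.1 (cur ++ [x]) (by simp)]
        simp [hx]
      · rw [cpRecA, if_pos hx, show ([] : List String) ++ [x] = [x] from rfl,
          ih.1 [x] (by simp), cpSpan_cons, if_pos hx]
        simp
    · refine ⟨fun cur hc => ?_, ?_⟩
      · rw [cpRecA, if_neg hx]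
        have h1 : List.takeWhile (fun y => decide (y ∈ nf)) (x :: xs) = [] := by simp [hx]
        have h2 : List.dropWhile (fun y => decide (y ∈ nf)) (x :: xs) = x :: xs := by
          simp [hx]
        rw [h1, h2, cpSpan_cons, if_neg hx]
        simp [hc, ih.2]
      · rw [cpRecA, if_neg hx, cpSpan_cons, if_neg hx]
        simp [ih.2]

-- ===== VERDICT (by name: the statement is the Claim_ definition above) =====
theorem contained_paths_spec : Claim_equal_contained_paths := by
  intro p nf _
  unfold Spec_contained_paths contained_paths contained_paths_alt
  rw [PySem.List.len_eq, PySem.List.foldl_pyRange_zero_pyGetD' p "" (cpStepA nf) ([], [])]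
  rw [cpFold_eq nf p [] []]
  simpa using (cpRecA_eq_span nf p).2
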